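-- pv_equiv track=rewrite | github.com/alanmanderson/wordscape | app/word_generator.py | get_words_by_length
-- ===== SOURCE A (Python) =====
-- def get_words_by_length(letters, length):
--   if length > len(letters): raise Exception('length is too big for these letters')
--   if length == 1:
--     return letters
--   words = set([])
--   for i in range(len(letters)):
--     cur_letters = letters.copy()
--     cur_letter = cur_letters.pop(i)
--     smaller_words = get_words_by_length(cur_letters, length - 1)
--     for word in smaller_words:
--       words.add(cur_letter + word)
--   return words
-- ===== SOURCE B (Python) =====
-- def get_words_by_length(letters, length):
--   cache = {}
--   def go(letters, length):
--     if length > len(letters): raise Exception('length is too big for these letters')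
--     if length == 1:
--       return letters
--     key = (tuple(letters), length)
--     if key in cache:
--       return cache[key]
--     words = set()
--     for i, cur_letter in enumerate(letters):
--       smaller_words = go(letters[:i] + letters[i+1:], length - 1)
--       for word in smaller_words:
--         words.add(cur_letter + word)
--     cache[key] = words
--     return words
--   return go(letters, length)
-- ===== Notes on version B (the rewrite author's own statement) =====
-- stated objective: alternative
-- what changed: Replaces the naive recursion (one fresh recursive call per popped index) by dynamic programming: a memo dict keyed by (tuple(remaining letters), length) computes each distinct remaining-letters subproblem once and reuses its word set, with an enumerate/slicing loop instead of copy-and-pop.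
import Mathlib
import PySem

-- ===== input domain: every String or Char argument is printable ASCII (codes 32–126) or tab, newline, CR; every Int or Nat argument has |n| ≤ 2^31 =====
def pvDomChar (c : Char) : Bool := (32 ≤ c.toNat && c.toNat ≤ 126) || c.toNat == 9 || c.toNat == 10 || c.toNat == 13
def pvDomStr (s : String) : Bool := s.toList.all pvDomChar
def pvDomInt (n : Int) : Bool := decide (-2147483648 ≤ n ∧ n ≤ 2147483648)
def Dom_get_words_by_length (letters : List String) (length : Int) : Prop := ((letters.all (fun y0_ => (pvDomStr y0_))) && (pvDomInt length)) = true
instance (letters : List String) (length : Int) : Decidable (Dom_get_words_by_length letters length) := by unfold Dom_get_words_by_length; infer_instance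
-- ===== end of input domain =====

-- B replaces the naive recursion by dynamic programming: a memo dict on (remaining letters,
-- length) reuses each distinct subproblem's word set; objective: alternative.

-- ===== PORT A =====
def get_words_by_length (letters : List String) (length : Int) : List String :=
  if length > (letters.length : Int) then []  -- Python raises Exception here; excluded by Pre_
  else if length = 1 then letters
  else
    (List.range letters.length).attach.foldl
      (fun words i =>
        match h : PySem.List.pop? letters ((i.1 : Nat) : Int) with
        | none => words                       -- unreachable: i < len(letters)
        | some r =>
          (get_words_by_length r.2 (length - 1)).foldl
            (fun ws word => PySem.Set.add ws (r.1 ++ word)) words)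
      (PySem.Set.ofList [])
termination_by letters.length
decreasing_by
  have := PySem.List.length_of_pop?_eq_some letters h
  omega

-- ===== PORT B =====
-- the inner 'go': the mutable closure cache is threaded through explicitly
def pvGo (cache : PySem.Dict (List String × Int) (List String)) (letters : List String)
    (length : Int) : List String × PySem.Dict (List String × Int) (List String) :=
  if length > (letters.length : Int) then ([], cache)  -- Python raises Exception here; excluded by Pre_
  else if length = 1 then (letters, cache)
  else
    match PySem.Dict.get? cache (letters, length) with
    | some w => (w, cache)
    | none =>
      let p := (PySem.List.enumerate letters).attach.foldl
        (fun st ic =>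
          let r := pvGo st.2
            (PySem.List.slice letters none (some ic.1.1) ++
              PySem.List.slice letters (some (ic.1.1 + 1)) none)
            (length - 1)
          (r.1.foldl (fun ws word => PySem.Set.add ws (ic.1.2 ++ word)) st.1, r.2))
        (PySem.Set.ofList [], cache)
      (p.1, PySem.Dict.insert p.2 (letters, length) p.1)
termination_by letters.length
decreasing_by
  obtain ⟨k, hk, hp⟩ := (PySem.List.mem_enumerate_iff letters 0 ic.1).mp ic.2
  rw [show ic.1.1 = ((k : Int)) from by rw [hp]; simp]
  rw [PySem.List.slice_to letters (by positivity), PySem.List.slice_from letters (by positivity)]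
  simp
  omega

def get_words_by_length_alt (letters : List String) (length : Int) : List String :=
  (pvGo PySem.Dict.empty letters length).1

-- ===== PRECONDITION & SPEC =====
-- Pre_ excludes exactly length > len(letters), where both A and B raise
-- Exception('length is too big for these letters').
def Pre_get_words_by_length (letters : List String) (length : Int) : Prop :=
  length ≤ (letters.length : Int)
instance (letters : List String) (length : Int) : Decidable (Pre_get_words_by_length letters length) := by unfold Pre_get_words_by_length; infer_instance
def pvWitness_get_words_by_length : List String × Int := (["a", "b"], 2)

def Spec_get_words_by_length (letters : List String) (length : Int) (out : List String) : Prop := out = get_words_by_length_alt letters length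
instance (letters : List String) (length : Int) (out : List String) : Decidable (Spec_get_words_by_length letters length out) := by unfold Spec_get_words_by_length; infer_instance

-- ===== CLAIM (what is proved, stated in full; the proofs are below) =====
def Claim_equal_get_words_by_length : Prop := ∀ (letters : List String) (length : Int), Dom_get_words_by_length letters length → Pre_get_words_by_length letters length → Spec_get_words_by_length letters length (get_words_by_length letters length)

-- ===== LEMMAS AND PROOFS =====

-- A's (and, after memoization, B's) loop body at index i, over plain Nat indices
def pvStep (letters : List String) (length : Int) (acc : List String) (i : Nat) : List String :=
  (get_words_by_length (letters.eraseIdx i) (length - 1)).foldl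
    (fun ws word => PySem.Set.add ws (letters.getD i "" ++ word)) acc

-- every cache entry is the value A computes
def pvGood (cache : PySem.Dict (List String × Int) (List String)) : Prop :=
  ∀ (ls : List String) (k : Int) (w : List String),
    PySem.Dict.get? cache (ls, k) = some w → w = get_words_by_length ls k

theorem pvA_loop (letters : List String) (length : Int)
    (h1 : ¬ length > (letters.length : Int)) (h2 : length ≠ 1) :
    get_words_by_length letters length
      = (List.range letters.length).foldl (pvStep letters length) (PySem.Set.ofList []) := by
  rw [get_words_by_length, if_neg h1, if_neg h2]
  rw [PySem.List.foldl_congr_mem _ _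
    (fun acc (x : {i // i ∈ List.range letters.length}) => pvStep letters length acc x.1) _ ?_]
  · simp
  · intro acc x hx
    have hi : x.1 < letters.length := List.mem_range.mp x.2
    rw [PySem.List.pop?_natCast letters x.1 hi]
    dsimp only
    unfold pvStep
    rw [List.getD_eq_getElem letters "" hi]

theorem pvGo_spec : ∀ (n : Nat) (ls : List String) (k : Int)
    (cache : PySem.Dict (List String × Int) (List String)), ls.length = n → pvGood cache →
    (pvGo cache ls k).1 = get_words_by_length ls k ∧ pvGood (pvGo cache ls k).2 := by
  intro n
  induction n using Nat.strong_induction_on with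
  | _ n ih =>
  intro ls k cache hn hg
  subst hn
  rw [pvGo]
  by_cases h1 : k > (ls.length : Int)
  · rw [if_pos h1, get_words_by_length, if_pos h1]
    exact ⟨rfl, hg⟩
  · rw [if_neg h1]
    by_cases h2 : k = 1
    · rw [if_pos h2, get_words_by_length, if_neg h1, if_pos h2]
      exact ⟨rfl, hg⟩
    · rw [if_neg h2]
      cases hc : PySem.Dict.get? cache (ls, k) with
      | some w =>
        simp only
        exact ⟨hg ls k w hc, hg⟩
      | none =>
        simp only
        have loop : ∀ (l : List {p // p ∈ PySem.List.enumerate ls 0})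
            (acc : List String) (c : PySem.Dict (List String × Int) (List String)), pvGood c →
            (l.foldl
              (fun st ic =>
                let r := pvGo st.2
                  (PySem.List.slice ls none (some ic.1.1) ++
                    PySem.List.slice ls (some (ic.1.1 + 1)) none)
                  (k - 1)
                (r.1.foldl (fun ws word => PySem.Set.add ws (ic.1.2 ++ word)) st.1, r.2))
              (acc, c)).1
              = l.foldl (fun a x => pvStep ls k a x.1.1.toNat) acc
            ∧ pvGood (l.foldl
              (fun st ic =>
                let r := pvGo st.2
                  (PySem.List.slice ls none (some ic.1.1) ++
                    PySem.List.slice ls (some (ic.1.1 + 1)) none)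
                  (k - 1)
                (r.1.foldl (fun ws word => PySem.Set.add ws (ic.1.2 ++ word)) st.1, r.2))
              (acc, c)).2 := by
          intro l
          induction l with
          | nil => intro acc c hgc; exact ⟨rfl, hgc⟩
          | cons x t iht =>
            intro acc c hgc
            obtain ⟨j, hj, hpx⟩ := (PySem.List.mem_enumerate_iff ls 0 x.1).mp x.2
            have hx1 : x.1.1 = (j : Int) := by rw [hpx]; simp
            have hx2 : x.1.2 = ls[j] := by rw [hpx]
            have hrest : PySem.List.slice ls none (some x.1.1) ++
                PySem.List.slice ls (some (x.1.1 + 1)) none = ls.eraseIdx j := by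
              rw [hx1, PySem.List.slice_to ls (by positivity),
                PySem.List.slice_from ls (by positivity),
                List.eraseIdx_eq_take_drop_succ]
              simp
            have hlen : (ls.eraseIdx j).length = ls.length - 1 := List.length_eraseIdx_of_lt hj
            simp only [List.foldl_cons]
            have hrec := ih (ls.length - 1) (by omega) (ls.eraseIdx j) (k - 1) c hlen hgc
            rw [hrest]
            rw [hrec.1]
            have hstep : ∀ (a : List String),
                (get_words_by_length (ls.eraseIdx j) (k - 1)).foldl
                  (fun ws word => PySem.Set.add ws (x.1.2 ++ word)) a
                  = pvStep ls k a x.1.1.toNat := by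
              intro a
              unfold pvStep
              rw [hx1, hx2]
              simp only [Int.toNat_natCast]
              rw [List.getD_eq_getElem ls "" hj]
            rw [hstep]
            exact iht _ _ hrec.2
        have hfin := loop (PySem.List.enumerate ls 0).attach (PySem.Set.ofList [])
          cache hg
        have hproj : (PySem.List.enumerate ls 0).attach.foldl
            (fun a x => pvStep ls k a x.1.1.toNat) (PySem.Set.ofList [])
            = get_words_by_length ls k := by
          have e1 : (PySem.List.enumerate ls 0).attach.foldl
              (fun a x => pvStep ls k a x.1.1.toNat) (PySem.Set.ofList [])
              = (PySem.List.enumerate ls 0).foldl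
                (fun a p => pvStep ls k a p.1.toNat) (PySem.Set.ofList []) :=
            List.foldl_attach (f := fun a (p : Int × String) => pvStep ls k a p.1.toNat)
              (b := PySem.Set.ofList [])
          rw [e1, pvA_loop ls k h1 h2]
          rw [PySem.List.enumerate_eq_map_pyRange ls ""]
          rw [PySem.List.len_eq, PySem.List.pyRange_zero_natCast]
          simp only [List.foldl_map, Int.toNat_natCast]
        have hp1 := hfin.1.trans hproj
        constructor
        · exact hp1
        · intro ls' k' w' hw'
          simp only [PySem.Dict.get?_insert] at hw'
          by_cases he : (ls', k') = (ls, k)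
          · rw [if_pos he] at hw'
            injection hw' with hw''
            obtain ⟨rfl, rfl⟩ := (Prod.mk.injEq ..).mp he
            rw [← hw'']
            exact hp1
          · rw [if_neg he] at hw'
            exact hfin.2 ls' k' w' hw'

-- ===== VERDICT (by name: the statement is the Claim_ definition above) =====
theorem get_words_by_length_spec : Claim_equal_get_words_by_length := by
  intro letters length hdom hpre
  unfold Spec_get_words_by_length get_words_by_length_alt
  have hempty : pvGood PySem.Dict.empty := by
    intro ls k w h
    simp [PySem.Dict.get?, PySem.Dict.empty] at h
  exact ((pvGo_spec letters.length letters length PySem.Dict.empty rfl hempty).1).symm
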